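-- pv_equiv track=rewrite | github.com/AIALRA-0/PySmartClip_Chatpgt_Mubu | PySmartClip_Chatpgt_Mubu.py | replace_eng_with_chn_char
-- ===== SOURCE A (Python) =====
-- def replace_eng_with_chn_char(text):
--     result = []  # 存放处理后的文本
--     inside_math = False  # 标记是否在数学公式内
--     buffer = ""  # 缓存当前正在处理的内容
--
--     for char in text:
--         if char == "$":
--             if inside_math:
--                 # 结束一个数学块
--                 buffer += "$"
--                 result.append(buffer)  # 直接存入结果，不做替换
--                 buffer = ""
--             else:
--                 # 开始一个数学块
--                 result.append(buffer.replace(',', '，').replace('.', '；').replace(':', '：'))  # 处理非数学块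
--                 buffer = "$"
--             inside_math = not inside_math  # 翻转标志
--         else:
--             buffer += char  # 继续累积字符
--
--     # 处理最后的剩余部分（如果最后不是数学块）
--     if buffer:
--         result.append(buffer.replace(',', '，').replace('.', '；').replace(':', '：'))
--
--     return "".join(result)
-- ===== SOURCE B (Python) =====
-- def replace_eng_with_chn_char(text):
--     parts = text.split('$')
--     last = len(parts) - 1
--     return '$'.join(
--         p.replace(',', '，').replace('.', '；').replace(':', '：')
--         if i % 2 == 0 or i == last else p
--         for i, p in enumerate(parts)
--     )
-- ===== Notes on version B (the rewrite author's own statement) =====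
-- stated objective: simpler
-- what changed: Replaces the stateful per-character toggle/buffer loop with a split on the dollar sign into alternating segments, replacing punctuation in even-indexed segments and in the final segment (the unclosed-math tail), then rejoining.
import Mathlib
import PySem

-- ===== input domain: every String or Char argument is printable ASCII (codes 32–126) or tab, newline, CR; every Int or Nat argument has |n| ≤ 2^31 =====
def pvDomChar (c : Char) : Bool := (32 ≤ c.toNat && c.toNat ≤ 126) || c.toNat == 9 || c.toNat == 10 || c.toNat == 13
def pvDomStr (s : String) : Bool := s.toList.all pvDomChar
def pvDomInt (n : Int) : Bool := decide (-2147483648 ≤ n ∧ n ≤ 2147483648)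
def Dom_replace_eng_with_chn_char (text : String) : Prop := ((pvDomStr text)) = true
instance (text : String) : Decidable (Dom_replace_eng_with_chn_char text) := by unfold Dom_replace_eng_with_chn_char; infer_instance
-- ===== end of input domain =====

-- B replaces A's stateful per-character toggle/buffer loop by a split on the dollar sign + an index-parity rule + join (simpler; a timing run measured it faster by a constant factor).

-- the shared punctuation substitution: buffer.replace(',','，').replace('.','；').replace(':','：')
def pvRepl (cs : List Char) : List Char :=
  PySem.Chars.replace (PySem.Chars.replace (PySem.Chars.replace cs [','] ['，']) ['.'] ['；']) [':'] ['：']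

-- ===== PORT A =====
-- A's for-loop over the characters with state (result, inside_math, buffer); at the end "".join(result).
def pvLoopA : List Char → List (List Char) → Bool → List Char → List (List Char)
  | [], result, _, buffer =>
      if buffer ≠ [] then result ++ [pvRepl buffer] else result
  | c :: rest, result, inside, buffer =>
      if c = '$' then
        if inside then pvLoopA rest (result ++ [buffer ++ ['$']]) false []
        else pvLoopA rest (result ++ [pvRepl buffer]) true ['$']
      else pvLoopA rest result inside (buffer ++ [c])

def replace_eng_with_chn_char (text : String) : String :=
  String.ofList (PySem.Chars.join [] (pvLoopA text.toList [] false []))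

-- ===== PORT B =====
-- parts = text.split('$'); last = len(parts)-1; '$'.join(repl(p) if i%2==0 or i==last else p for i,p in enumerate(parts))
def replace_eng_with_chn_char_alt (text : String) : String :=
  let parts := PySem.Chars.splitOn text.toList ['$']
  let last : Int := (parts.length : Int) - 1
  String.ofList (PySem.Chars.join ['$']
    ((PySem.List.enumerate parts).map
      (fun ip => if PySem.Int.mod ip.1 2 == 0 || ip.1 == last then pvRepl ip.2 else ip.2)))

-- ===== PRECONDITION & SPEC =====
def Spec_replace_eng_with_chn_char (text : String) (out : String) : Prop := out = replace_eng_with_chn_char_alt text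
instance (text : String) (out : String) : Decidable (Spec_replace_eng_with_chn_char text out) := by unfold Spec_replace_eng_with_chn_char; infer_instance

-- ===== CLAIM (what is proved, stated in full; the proofs are below) =====
def Claim_equal_replace_eng_with_chn_char : Prop := ∀ (text : String), Dom_replace_eng_with_chn_char text → Spec_replace_eng_with_chn_char text (replace_eng_with_chn_char text)

-- ===== LEMMAS AND PROOFS =====

-- the single-character map the three chained replaces amount to
def pvChMap (c : Char) : Char :=
  if c = ',' then '，' else if c = '.' then '；' else if c = ':' then '：' else c

-- structural model of text.split('$')
def pvSplitD : List Char → List (List Char)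
  | [] => [[]]
  | c :: rest => if c = '$' then [] :: pvSplitD rest
                 else match pvSplitD rest with
                      | [] => [[c]]
                      | h :: t => (c :: h) :: t

def pvConsHead (p : List Char) : List (List Char) → List (List Char)
  | [] => [p]
  | h :: t => (p ++ h) :: t

-- the alternating processor both programs reduce to (true = outside math / replace)
def pvProc : Bool → List (List Char) → List Char
  | _, [] => []
  | _, [s] => pvRepl s
  | b, s :: s' :: rest => (if b then pvRepl s else s) ++ '$' :: pvProc (!b) (s' :: rest)

theorem pvReplace_single (o n : Char) (l : List Char) :
    PySem.Chars.replace l [o] [n] = l.map (fun c => if c = o then n else c) := by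
  show PySem.Chars.replace.go [o] [n] l.length l [] = _
  suffices h : ∀ fuel l acc, (l : List Char).length ≤ fuel →
      PySem.Chars.replace.go [o] [n] fuel l acc
        = acc.reverse ++ l.map (fun c => if c = o then n else c) by
    simpa using h l.length l [] le_rfl
  intro fuel
  induction fuel with
  | zero => intro l acc h; have : l = [] := List.eq_nil_of_length_eq_zero (Nat.le_zero.mp h); subst this; simp [PySem.Chars.replace.go]
  | succ n ih =>
    intro l acc h
    cases l with
    | nil => simp [PySem.Chars.replace.go]
    | cons c t =>
      simp only [PySem.Chars.replace.go]
      by_cases hc : c = o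
      · subst hc
        simp only [List.isPrefixOf, BEq.rfl, Bool.true_and, if_pos, List.length_cons,
          List.length_nil, Nat.zero_add, List.drop_succ_cons, List.drop_zero]
        rw [ih t _ (by simpa using Nat.le_of_succ_le_succ h)]
        simp
      · have : ([o].isPrefixOf (c :: t)) = false := by
          simp [List.isPrefixOf]; exact fun hco => hc hco.symm
        rw [this]
        simp only [Bool.false_eq_true, if_false]
        rw [ih t _ (by simpa using Nat.le_of_succ_le_succ h)]
        simp [hc]

theorem pvRepl_eq_map (cs : List Char) : pvRepl cs = cs.map pvChMap := by
  unfold pvRepl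
  rw [pvReplace_single, pvReplace_single, pvReplace_single]
  simp only [List.map_map]
  apply List.map_congr_left
  intro c _
  simp only [Function.comp, pvChMap]
  by_cases h1 : c = ',' <;> by_cases h2 : c = '.' <;> by_cases h3 : c = ':' <;>
    simp_all

theorem pvRepl_nil : pvRepl [] = [] := by simp [pvRepl_eq_map]

theorem pvRepl_cons (c : Char) (cs : List Char) :
    pvRepl (c :: cs) = pvChMap c :: pvRepl cs := by simp [pvRepl_eq_map]

theorem pvSplitD_ne_nil (l : List Char) : pvSplitD l ≠ [] := by
  cases l with
  | nil => simp [pvSplitD]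
  | cons c rest =>
    simp only [pvSplitD]
    split <;> [simp; skip]
    cases h : pvSplitD rest <;> simp

theorem pvConsHead_nil (l : List (List Char)) (h : l ≠ []) : pvConsHead [] l = l := by
  cases l with
  | nil => exact absurd rfl h
  | cons x t => simp [pvConsHead]

theorem pvSplitOn_go (fuel : Nat) : ∀ (l cur : List Char) (acc : List (List Char)),
    l.length ≤ fuel →
    PySem.Chars.splitOn.go ['$'] fuel l cur acc
      = acc.reverse ++ pvConsHead cur.reverse (pvSplitD l) := by
  induction fuel with
  | zero =>
    intro l cur acc h
    have : l = [] := List.eq_nil_of_length_eq_zero (Nat.le_zero.mp h)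
    subst this
    simp [PySem.Chars.splitOn.go, pvSplitD, pvConsHead]
  | succ n ih =>
    intro l cur acc h
    cases l with
    | nil => simp [PySem.Chars.splitOn.go, pvSplitD, pvConsHead]
    | cons c t =>
      simp only [PySem.Chars.splitOn.go]
      by_cases hc : c = '$'
      · subst hc
        simp only [List.isPrefixOf, BEq.rfl, Bool.true_and, if_pos, List.length_cons,
          List.length_nil, Nat.zero_add, List.drop_succ_cons, List.drop_zero]
        rw [ih t [] _ (by simpa using Nat.le_of_succ_le_succ h)]
        simp only [pvSplitD, reduceIte, List.reverse_nil]
        rw [pvConsHead_nil _ (pvSplitD_ne_nil t)]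
        simp [pvConsHead]
      · have hpre : (['$'].isPrefixOf (c :: t)) = false := by
          simp [List.isPrefixOf]; exact fun hco => hc hco.symm
        rw [hpre]
        simp only [Bool.false_eq_true, if_false]
        rw [ih t (c :: cur) acc (by simpa using Nat.le_of_succ_le_succ h)]
        simp only [pvSplitD, if_neg hc, List.reverse_cons]
        cases hs : pvSplitD t with
        | nil => exact absurd hs (pvSplitD_ne_nil t)
        | cons hh tt => simp [pvConsHead]

theorem pvSplitOn_eq (l : List Char) : PySem.Chars.splitOn l ['$'] = pvSplitD l := by
  show PySem.Chars.splitOn.go ['$'] (l.length + 1) l [] [] = _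
  rw [pvSplitOn_go (l.length + 1) l [] [] (Nat.le_succ _)]
  simpa using pvConsHead_nil _ (pvSplitD_ne_nil l)

-- ---- A-side: the loop computes pvProc over the split ----

theorem pvJoinNil_flatten : ∀ (parts : List (List Char)),
    PySem.Chars.join [] parts = parts.flatten
  | [] => by simp [PySem.Chars.join_nil]
  | [p] => by simp [PySem.Chars.join, List.intercalate]
  | p :: q :: rest => by
      rw [PySem.Chars.join_cons_cons, pvJoinNil_flatten (q :: rest)]
      simp

theorem pvLoopA_proc (cs : List Char) :
    (∀ (res : List (List Char)) (buf : List Char),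
      (pvLoopA cs res false buf).flatten
        = res.flatten ++ pvProc true (pvConsHead buf (pvSplitD cs)))
    ∧ (∀ (res : List (List Char)) (s : List Char),
      (pvLoopA cs res true ('$' :: s)).flatten
        = res.flatten ++ '$' :: pvProc false (pvConsHead s (pvSplitD cs))) := by
  induction cs with
  | nil =>
    constructor
    · intro res buf
      by_cases hb : buf = []
      · subst hb; simp [pvLoopA, pvSplitD, pvConsHead, pvProc, pvRepl_nil]
      · simp [pvLoopA, hb, pvSplitD, pvConsHead, pvProc]
    · intro res s
      simp [pvLoopA, pvSplitD, pvConsHead, pvProc, pvRepl_cons]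
      decide
  | cons c rest ih =>
    by_cases hc : c = '$'
    · subst hc
      constructor
      · intro res buf
        simp only [pvLoopA, reduceIte, Bool.false_eq_true, if_false]
        rw [ih.2 (res ++ [pvRepl buf]) []]
        simp only [pvSplitD, reduceIte]
        rw [pvConsHead_nil _ (pvSplitD_ne_nil rest)]
        cases hs : pvSplitD rest with
        | nil => exact absurd hs (pvSplitD_ne_nil rest)
        | cons hh tt => simp [pvConsHead, pvProc]
      · intro res s
        simp only [pvLoopA, reduceIte]
        rw [ih.1 (res ++ ['$' :: s ++ ['$']]) []]
        rw [pvConsHead_nil _ (pvSplitD_ne_nil rest)]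
        simp only [pvSplitD, reduceIte]
        cases hs : pvSplitD rest with
        | nil => exact absurd hs (pvSplitD_ne_nil rest)
        | cons hh tt => simp [pvConsHead, pvProc]
    · constructor
      · intro res buf
        simp only [pvLoopA, if_neg hc]
        rw [ih.1 res (buf ++ [c])]
        simp only [pvSplitD, if_neg hc]
        cases hs : pvSplitD rest with
        | nil => exact absurd hs (pvSplitD_ne_nil rest)
        | cons hh tt => simp [pvConsHead]
      · intro res s
        have hb : '$' :: s ++ [c] = '$' :: (s ++ [c]) := by simp
        simp only [pvLoopA, if_neg hc]
        rw [hb, ih.2 res (s ++ [c])]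
        simp only [pvSplitD, if_neg hc]
        cases hs : pvSplitD rest with
        | nil => exact absurd hs (pvSplitD_ne_nil rest)
        | cons hh tt => simp [pvConsHead]

-- ---- B-side: enumerate + parity/last rule computes pvProc ----

theorem pvEnum_proc : ∀ (parts : List (List Char)) (j last : Int), parts ≠ [] →
    last = j + (parts.length : Int) - 1 →
    PySem.Chars.join ['$']
      ((PySem.List.enumerate parts j).map
        (fun ip => if PySem.Int.mod ip.1 2 == 0 || ip.1 == last then pvRepl ip.2 else ip.2))
      = pvProc (PySem.Int.mod j 2 == 0) parts
  | [], j, last, h, _ => absurd rfl h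
  | [p], j, last, _, hl => by
      have hj : j = last := by simp [hl]
      subst hj
      simp [PySem.List.enumerate, PySem.Chars.join, List.intercalate, pvProc]
  | p :: q :: rest, j, last, _, hl => by
      have hj : (j == last) = false := by
        simp only [beq_eq_false_iff_ne, ne_eq, hl, List.length_cons]
        push_cast
        omega
      have hpar : (PySem.Int.mod (j + 1) 2 == 0) = !(PySem.Int.mod j 2 == 0) := by
        have h1 := PySem.Int.mod_nonneg j (by norm_num : (0:Int) < 2)
        have h2 := PySem.Int.mod_lt j (by norm_num : (0:Int) < 2)
        have h3 := PySem.Int.mod_nonneg (j+1) (by norm_num : (0:Int) < 2)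
        have h4 := PySem.Int.mod_lt (j+1) (by norm_num : (0:Int) < 2)
        have h5 := PySem.Int.floordiv_mul_add_mod j 2
        have h6 := PySem.Int.floordiv_mul_add_mod (j+1) 2
        cases ha : PySem.Int.mod j 2 == 0 <;> cases hb : PySem.Int.mod (j+1) 2 == 0 <;>
          simp_all <;> omega
      have hih := pvEnum_proc (q :: rest) (j + 1) last (by simp)
        (by simp only [List.length_cons] at hl ⊢; push_cast at hl ⊢; omega)
      simp only [PySem.List.enumerate, List.map] at hih ⊢
      rw [PySem.Chars.join_cons_cons, hih, hj, hpar]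
      cases hb : (PySem.Int.mod j 2 == 0) <;> simp [pvProc]

-- ===== VERDICT (by name: the statement is the Claim_ definition above) =====
theorem replace_eng_with_chn_char_spec : Claim_equal_replace_eng_with_chn_char := by
  intro text _
  show replace_eng_with_chn_char text = replace_eng_with_chn_char_alt text
  unfold replace_eng_with_chn_char replace_eng_with_chn_char_alt
  rw [pvJoinNil_flatten, (pvLoopA_proc text.toList).1 [] []]
  rw [pvSplitOn_eq]
  have h0 : (PySem.Int.mod 0 2 == 0) = true := by decide
  have := pvEnum_proc (pvSplitD text.toList) 0 ((pvSplitD text.toList).length - 1)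
    (pvSplitD_ne_nil _) (by ring)
  rw [h0] at this
  rw [pvConsHead_nil _ (pvSplitD_ne_nil _)]
  simp only [List.flatten_nil, List.nil_append]
  rw [← this]
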